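-- pv_equiv track=rewrite | github.com/zyukyunman/vortex_quant | vortex/data/provider/tushare_registry.py | normalize_tushare_update_frequencies
-- ===== SOURCE A (Python) =====
-- TUSHARE_UPDATE_FREQUENCY_ORDER: tuple[str, ...] = (
--     "daily",
--     "weekly",
--     "monthly",
--     "quarterly",
--     "other",
--     "intraday",
-- )
--
-- TUSHARE_UPDATE_FREQUENCY_ALIASES: dict[str, str] = {
--     "hourly": "intraday",
--     "realtime": "intraday",
-- }
--
-- def normalize_tushare_update_frequencies(
--     update_frequencies: list[str] | tuple[str, ...] | set[str] | None,
-- ) -> list[str]: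
--     """规范化更新频率列表，并按统一优先级排序。"""
--     if not update_frequencies:
--         return []
--
--     normalized: list[str] = []
--     seen: set[str] = set()
--     for raw in update_frequencies:
--         token = str(raw).strip().lower()
--         if not token:
--             continue
--         canonical = TUSHARE_UPDATE_FREQUENCY_ALIASES.get(token, token)
--         if canonical not in TUSHARE_UPDATE_FREQUENCY_ORDER:
--             allowed = ", ".join(TUSHARE_UPDATE_FREQUENCY_ORDER)
--             raise ValueError(
--                 f"未知更新频率: {raw}；可选值: {allowed}"
--             )
--         if canonical not in seen:
--             normalized.append(canonical)
--             seen.add(canonical)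
--
--     normalized.sort(key=TUSHARE_UPDATE_FREQUENCY_ORDER.index)
--     return normalized
-- ===== SOURCE B (Python) =====
-- TUSHARE_UPDATE_FREQUENCY_ORDER: tuple[str, ...] = (
--     "daily",
--     "weekly",
--     "monthly",
--     "quarterly",
--     "other",
--     "intraday",
-- )
--
-- TUSHARE_UPDATE_FREQUENCY_ALIASES: dict[str, str] = {
--     "hourly": "intraday",
--     "realtime": "intraday",
-- }
--
--
-- def normalize_tushare_update_frequencies(update_frequencies):
--     """Normalize update-frequency tokens, then emit them in canonical priority order."""
--     if not update_frequencies: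
--         return []
--     present = set()
--     for raw in update_frequencies:
--         token = str(raw).strip().lower()
--         if not token:
--             continue
--         canonical = TUSHARE_UPDATE_FREQUENCY_ALIASES.get(token, token)
--         if canonical not in TUSHARE_UPDATE_FREQUENCY_ORDER:
--             allowed = ", ".join(TUSHARE_UPDATE_FREQUENCY_ORDER)
--             raise ValueError(f"未知更新频率: {raw}；可选值: {allowed}")
--         present.add(canonical)
--     return [c for c in TUSHARE_UPDATE_FREQUENCY_ORDER if c in present]
-- ===== Notes on version B (the rewrite author's own statement) =====
-- stated objective: simpler
-- what changed: B drops A's dedup list, its 'seen' ordering bookkeeping and the final sort(key=ORDER.index): it only records which canonical values occur in a set, then derives the result by one filter pass over the canonical order tuple.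
import Mathlib
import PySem

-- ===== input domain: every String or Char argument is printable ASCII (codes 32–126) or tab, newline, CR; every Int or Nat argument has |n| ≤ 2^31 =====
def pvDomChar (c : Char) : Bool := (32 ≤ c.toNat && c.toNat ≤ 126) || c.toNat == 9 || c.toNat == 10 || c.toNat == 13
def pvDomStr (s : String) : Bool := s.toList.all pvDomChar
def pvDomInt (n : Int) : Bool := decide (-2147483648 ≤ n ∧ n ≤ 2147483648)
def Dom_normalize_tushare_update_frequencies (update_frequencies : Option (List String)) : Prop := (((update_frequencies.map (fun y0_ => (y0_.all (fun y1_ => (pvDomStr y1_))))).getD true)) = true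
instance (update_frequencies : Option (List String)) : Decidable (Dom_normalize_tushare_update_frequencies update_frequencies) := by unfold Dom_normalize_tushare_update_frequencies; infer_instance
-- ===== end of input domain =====

-- B replaces A's dedup list + 'seen' tracking + sort(key=ORDER.index) with a present-set and
-- one filter pass over the canonical order tuple (objective: simpler).

-- ===== PORT A =====
def pvORDER : List String := ["daily", "weekly", "monthly", "quarterly", "other", "intraday"]

def pvALIASES : PySem.Dict String String := PySem.Dict.ofList [("hourly", "intraday"), ("realtime", "intraday")]

-- token = str(raw).strip().lower()
def pvToken (raw : String) : String := PySem.Str.lower (PySem.Str.strip raw)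

-- canonical = TUSHARE_UPDATE_FREQUENCY_ALIASES.get(token, token)
def pvCanon (t : String) : String := PySem.Dict.getD pvALIASES t t

-- key=TUSHARE_UPDATE_FREQUENCY_ORDER.index; exact whenever the element is in the tuple
-- (the sorted list contains only members of pvORDER, guaranteed by the loop's validation)
def pvKey (c : String) : Nat := (PySem.List.index? pvORDER c).getD 0

-- A's loop body over state (normalized, seen); on the branch where Python raises ValueError
-- (canonical not in the order tuple — excluded by Pre_) the state is left unchanged.
def pvStepA (st : List String × PySem.Set String) (raw : String) : List String × PySem.Set String :=
  if pvToken raw = "" then st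
  else if pvCanon (pvToken raw) ∈ pvORDER then
    if PySem.Set.contains st.2 (pvCanon (pvToken raw)) then st
    else (st.1 ++ [pvCanon (pvToken raw)], PySem.Set.add st.2 (pvCanon (pvToken raw)))
  else st

def normalize_tushare_update_frequencies (update_frequencies : Option (List String)) : List String :=
  match update_frequencies with
  | none => []
  | some l =>
    if l = [] then []
    else
      let st := l.foldl pvStepA ([], PySem.Set.empty)
      PySem.List.sorted st.1 pvKey false

-- ===== PORT B =====
-- B's loop body over the 'present' set; on the Python-raise branch (outside Pre_) unchanged.
def pvStepB (p : PySem.Set String) (raw : String) : PySem.Set String :=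
  if pvToken raw = "" then p
  else if pvCanon (pvToken raw) ∈ pvORDER then PySem.Set.add p (pvCanon (pvToken raw))
  else p

def normalize_tushare_update_frequencies_alt (update_frequencies : Option (List String)) : List String :=
  match update_frequencies with
  | none => []
  | some l =>
    if l = [] then []
    else
      let present := l.foldl pvStepB PySem.Set.empty
      pvORDER.filter (fun c => PySem.Set.contains present c)

-- ===== PRECONDITION & SPEC =====
-- Pre_ excludes exactly the inputs on which A raises ValueError: a token that is nonempty
-- after strip/lower but whose alias-resolved form is not in the canonical order tuple.
def Pre_normalize_tushare_update_frequencies (update_frequencies : Option (List String)) : Prop :=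
  ∀ l, update_frequencies = some l → ∀ raw ∈ l,
    pvToken raw = "" ∨ pvCanon (pvToken raw) ∈ pvORDER

instance (update_frequencies : Option (List String)) : Decidable (Pre_normalize_tushare_update_frequencies update_frequencies) := by unfold Pre_normalize_tushare_update_frequencies; infer_instance

def pvWitness_normalize_tushare_update_frequencies : Option (List String) :=
  some [" Daily ", "HOURLY", "daily", "weekly", ""]

def Spec_normalize_tushare_update_frequencies (update_frequencies : Option (List String)) (out : List String) : Prop := out = normalize_tushare_update_frequencies_alt update_frequencies
instance (update_frequencies : Option (List String)) (out : List String) : Decidable (Spec_normalize_tushare_update_frequencies update_frequencies out) := by unfold Spec_normalize_tushare_update_frequencies; infer_instance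

-- ===== CLAIM (what is proved, stated in full; the proofs are below) =====
def Claim_equal_normalize_tushare_update_frequencies : Prop := ∀ (update_frequencies : Option (List String)), Dom_normalize_tushare_update_frequencies update_frequencies → Pre_normalize_tushare_update_frequencies update_frequencies → Spec_normalize_tushare_update_frequencies update_frequencies (normalize_tushare_update_frequencies update_frequencies)

-- ===== LEMMAS AND PROOFS =====
set_option maxHeartbeats 1000000

-- one loop step: A's paired state stays (p, p) when B's state is p
theorem pvStepA_pair (p : PySem.Set String) (raw : String) :
    pvStepA (p, p) raw = (pvStepB p raw, pvStepB p raw) := by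
  unfold pvStepA pvStepB
  split_ifs with h0 h1 h2
  · rfl
  · simp at h2; simp [PySem.Set.add, h2]
  · simp at h2; simp [PySem.Set.add, h2]
  · rfl

theorem pvFoldA_pair (l : List String) (p : PySem.Set String) :
    l.foldl pvStepA (p, p) = (l.foldl pvStepB p, l.foldl pvStepB p) := by
  induction l generalizing p with
  | nil => rfl
  | cons x xs ih => simp [List.foldl_cons, pvStepA_pair, ih]

theorem pvFoldB_nodup (l : List String) (p : PySem.Set String) (hp : p.Nodup) :
    (l.foldl pvStepB p).Nodup := by
  induction l generalizing p with
  | nil => exact hp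
  | cons x xs ih =>
    apply ih
    unfold pvStepB
    split_ifs <;> first | exact hp | exact PySem.Set.nodup_add _ _ hp

theorem pvFoldB_mem (l : List String) (p : PySem.Set String) (x : String)
    (hx : x ∈ l.foldl pvStepB p) : x ∈ p ∨ x ∈ pvORDER := by
  induction l generalizing p with
  | nil => exact Or.inl hx
  | cons y ys ih =>
    rw [List.foldl_cons] at hx
    rcases ih _ hx with h | h
    · unfold pvStepB at h
      split_ifs at h with h1 h2
      · exact Or.inl h
      · rcases (PySem.Set.mem_add _ _ _).mp h with h | h
        · exact Or.inl h
        · subst h; exact Or.inr h2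
      · exact Or.inl h
    · exact Or.inr h

-- the canonical order tuple is strictly increasing under its own index key
theorem pvORDER_pairwise : pvORDER.Pairwise (fun a b => pvKey a < pvKey b) := by decide

theorem pvORDER_nodup : pvORDER.Nodup := by decide

-- characterization of A's final sort: a nodup list of members of pvORDER, sorted by
-- pvORDER.index, is exactly pvORDER filtered by membership
theorem pvSorted_eq_filter (q : List String) (hnd : q.Nodup)
    (hsub : ∀ x ∈ q, x ∈ pvORDER) :
    PySem.List.sorted q pvKey false = pvORDER.filter (fun c => decide (c ∈ q)) := by
  apply PySem.List.sorted_eq_of_perm_of_pairwise_lt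
  · apply (List.perm_ext_iff_of_nodup (List.Nodup.filter _ pvORDER_nodup) hnd).mpr
    intro x
    simp only [List.mem_filter, decide_eq_true_eq]
    exact ⟨fun h => h.2, fun h => ⟨hsub x h, h⟩⟩
  · exact List.Pairwise.filter _ pvORDER_pairwise

-- ===== VERDICT (by name: the statement is the Claim_ definition above) =====
theorem normalize_tushare_update_frequencies_spec : Claim_equal_normalize_tushare_update_frequencies := by
  intro u _ _
  unfold Spec_normalize_tushare_update_frequencies
  unfold normalize_tushare_update_frequencies normalize_tushare_update_frequencies_alt
  match u with
  | none => rfl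
  | some l =>
    by_cases hl : l = []
    · simp [hl]
    · simp only [hl, if_false]
      have hpair := pvFoldA_pair l PySem.Set.empty
      have hempty : (([], PySem.Set.empty) : List String × PySem.Set String)
          = (PySem.Set.empty, PySem.Set.empty) := rfl
      rw [hempty, hpair]
      have hnd := pvFoldB_nodup l PySem.Set.empty (by simp [PySem.Set.empty])
      have hsub : ∀ x ∈ l.foldl pvStepB PySem.Set.empty, x ∈ pvORDER := by
        intro x hx
        rcases pvFoldB_mem l PySem.Set.empty x hx with h | h
        · simp [PySem.Set.empty] at h
        · exact h
      rw [pvSorted_eq_filter _ hnd hsub]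
      congr 1
      funext c
      simp [PySem.Set.contains_eq_listContains]
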